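-- pv_equiv track=rewrite | github.com/EugeneBezuglov/TG-bot-commodities | bot_logic/message_parser.py | get_price_ranking
-- ===== SOURCE A (Python) =====
-- def get_price_ranking(strings_list):
--     # top N -> return a table of N highest prices and corresponding dates/periods
--     # bottom N -> return a table of N lowest prices and corresponding dates/periods
--     # max N -> return an Nth highest price value and the corresponding date/period
--     # mix N ->return an Nth lowest price value and the corresponding date/period
--     rank_type = None
--     rank_type_count = 0
--     rank_position = None
--     valid_keywords = {'top', 'bottom', 'max', 'min'}
--
--     # find the rank type. If multiple types, return none
--     for string in strings_list:
--         if string in valid_keywords: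
--             rank_type = string
--             rank_type_count += 1
--             if rank_type_count > 1:
--                 rank_type = None
--                 rank_position = None
--                 break
--
--     # if a valid rank type is found, check for a rank position
--     if rank_type is not None:
--         # Find the index of the rank_type in the strings_list
--         rank_type_index = strings_list.index(rank_type)
--         # Check the next string after the rank_type for a valid rank position
--         if rank_type_index + 1 < len(strings_list):
--             next_string = strings_list[rank_type_index + 1]
--             if next_string.isdigit() and 1 <= int(next_string) <= 10:
--                 rank_position = int(next_string)
--
--     return rank_type, rank_position
-- ===== SOURCE B (Python) =====
-- def get_price_ranking(strings_list):
--     # Single right-to-left scan: a tiny state machine carries the successor token,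
--     # so no indices, no counter and no second .index() scan are needed.
--     valid_keywords = {'top', 'bottom', 'max', 'min'}
--     found = None          # None = no keyword yet; ('one', kw, succ); 'many' = >1 keywords
--     succ = None           # the token just after the current one in the original order
--     for s in reversed(strings_list):
--         if s in valid_keywords:
--             found = ('one', s, succ) if found is None else 'many'
--         succ = s
--     if found is None or found == 'many':
--         return None, None
--     _, rank_type, nxt = found
--     rank_position = None
--     if nxt is not None and nxt.isdigit() and 1 <= int(nxt) <= 10:
--         rank_position = int(nxt)
--     return rank_type, rank_position
-- ===== Notes on version B (the rewrite author's own statement) =====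
-- stated objective: alternative
-- what changed: B scans the list once from right to left with a state machine that carries the successor token alongside each element, so the keyword's following token is already in hand and A's index arithmetic, counter and second .index() rescan all disappear.
import Mathlib
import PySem

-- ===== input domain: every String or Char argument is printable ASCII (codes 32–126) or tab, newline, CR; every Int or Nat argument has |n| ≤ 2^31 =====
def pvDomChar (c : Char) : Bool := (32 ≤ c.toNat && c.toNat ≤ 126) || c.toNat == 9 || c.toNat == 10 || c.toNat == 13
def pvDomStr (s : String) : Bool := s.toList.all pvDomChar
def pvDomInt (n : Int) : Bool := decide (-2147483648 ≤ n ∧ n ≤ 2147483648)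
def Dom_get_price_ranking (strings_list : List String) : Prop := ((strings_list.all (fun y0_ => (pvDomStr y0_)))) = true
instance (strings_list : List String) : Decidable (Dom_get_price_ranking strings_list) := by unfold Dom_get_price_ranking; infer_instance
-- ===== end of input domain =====

-- B scans once right-to-left carrying the successor token in a state machine, removing
-- A's counter, index arithmetic and second .index() rescan (objective: alternative).


-- ===== PORT A =====
-- valid_keywords = {'top', 'bottom', 'max', 'min'}  (membership test only)
def pvKeywords : List String := ["top", "bottom", "max", "min"]

-- the for-loop of A: state (rank_type, rank_type_count); break returns None
def pvALoop : List String → Option String → Nat → Option String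
  | [], rank_type, _ => rank_type
  | s :: rest, rank_type, cnt =>
    if pvKeywords.contains s then
      if cnt + 1 > 1 then none
      else pvALoop rest (some s) (cnt + 1)
    else pvALoop rest rank_type cnt

def get_price_ranking (strings_list : List String) : Option String × Option Int :=
  match pvALoop strings_list none 0 with
  | none => (none, none)
  | some rank_type =>
    -- strings_list.index(rank_type): never raises here since rank_type came from the list
    match PySem.List.index? strings_list rank_type with
    | none => (some rank_type, none)  -- unreachable
    | some rank_type_index =>
      if rank_type_index + 1 < strings_list.length then
        match strings_list[rank_type_index + 1]? with  -- exact: index nonneg and in range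
        | none => (some rank_type, none)  -- unreachable
        | some next_string =>
          if PySem.Str.strIsdigit next_string then
            match PySem.Int.ofStr? next_string with
            | some v => if 1 ≤ v ∧ v ≤ 10 then (some rank_type, some v) else (some rank_type, none)
            | none => (some rank_type, none)  -- unreachable: isdigit → int() succeeds
          else (some rank_type, none)
      else (some rank_type, none)

-- ===== PORT B =====
-- found: None | ('one', kw, succ) | 'many'
inductive PvFound
  | zero
  | one (kw : String) (succ : Option String)
  | many
deriving DecidableEq, Repr

-- one step of B's loop body; state = (found, succ)
def pvBStep (st : PvFound × Option String) (s : String) : PvFound × Option String :=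
  ( if pvKeywords.contains s then
      match st.1 with
      | PvFound.zero => PvFound.one s st.2
      | _ => PvFound.many
    else st.1,
    some s )

def get_price_ranking_alt (strings_list : List String) : Option String × Option Int :=
  -- 'for s in reversed(strings_list): …' = fold over the reversed list
  let st := strings_list.reverse.foldl pvBStep (PvFound.zero, none)
  match st.1 with
  | PvFound.one rank_type nxt =>
    let rank_position : Option Int :=
      match nxt with
      | none => none
      | some ns =>
        if PySem.Str.strIsdigit ns then
          match PySem.Int.ofStr? ns with
          | some v => if 1 ≤ v ∧ v ≤ 10 then some v else none
          | none => none
        else none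
    (some rank_type, rank_position)
  | _ => (none, none)

-- ===== PRECONDITION & SPEC =====
def Spec_get_price_ranking (strings_list : List String) (out : Option String × Option Int) : Prop := out = get_price_ranking_alt strings_list
instance (strings_list : List String) (out : Option String × Option Int) : Decidable (Spec_get_price_ranking strings_list out) := by unfold Spec_get_price_ranking; infer_instance

-- ===== CLAIM (what is proved, stated in full; the proofs are below) =====
def Claim_equal_get_price_ranking : Prop := ∀ (strings_list : List String), Dom_get_price_ranking strings_list → Spec_get_price_ranking strings_list (get_price_ranking strings_list)

-- ===== LEMMAS AND PROOFS =====

-- proof-side summary of B's fold: first component of the state after the whole scan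
def pvSummary : List String → PvFound
  | [] => PvFound.zero
  | s :: rest =>
    if pvKeywords.contains s then
      match pvSummary rest with
      | PvFound.zero => PvFound.one s rest.head?
      | _ => PvFound.many
    else pvSummary rest

theorem pvBFold_eq (l : List String) :
    l.reverse.foldl pvBStep (PvFound.zero, none) = (pvSummary l, l.head?) := by
  rw [List.foldl_reverse]
  induction l with
  | nil => rfl
  | cons s rest ih =>
    rw [List.foldr_cons, ih]
    simp only [pvBStep, pvSummary, List.head?]

theorem pvALoop_one (l : List String) (k : String) :
    pvALoop l (some k) 1 =
      match l.filter (fun s => pvKeywords.contains s) with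
      | [] => some k
      | _ :: _ => none := by
  induction l generalizing k with
  | nil => rfl
  | cons s rest ih =>
    simp only [pvALoop, List.filter_cons]
    by_cases h : s ∈ pvKeywords
    · simp [h]
    · simp [h, ih]

theorem pvALoop_zero (l : List String) :
    pvALoop l none 0 =
      match l.filter (fun s => pvKeywords.contains s) with
      | [kw] => some kw
      | _ => none := by
  induction l with
  | nil => rfl
  | cons s rest ih =>
    simp only [pvALoop, List.filter_cons]
    by_cases h : s ∈ pvKeywords
    · have hc : pvKeywords.contains s = true := by simpa using h
      rw [if_pos hc, if_neg (show ¬(0 + 1 > 1) by omega), pvALoop_one, if_pos hc]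
      cases hr : rest.filter (fun s => pvKeywords.contains s) <;> rfl
    · simp [h, ih]

theorem pvSummary_zero (l : List String) (h : l.filter (fun s => pvKeywords.contains s) = []) :
    pvSummary l = PvFound.zero := by
  induction l with
  | nil => rfl
  | cons s rest ih =>
    simp only [List.filter_cons] at h
    by_cases hs : s ∈ pvKeywords
    · rw [if_pos (by simpa using hs)] at h
      simp at h
    · rw [if_neg (by simpa using hs)] at h
      simp only [pvSummary]
      rw [if_neg (by simpa using hs)]
      exact ih h

theorem pvSummary_zero' (l : List String) (hz : pvSummary l = PvFound.zero) :
    l.filter (fun s => pvKeywords.contains s) = [] := by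
  induction l with
  | nil => rfl
  | cons s rest ih =>
    simp only [pvSummary] at hz
    by_cases hs : s ∈ pvKeywords
    · rw [if_pos (by simpa using hs)] at hz
      cases h : pvSummary rest <;> rw [h] at hz <;> simp at hz
    · rw [if_neg (by simpa using hs)] at hz
      rw [List.filter_cons, if_neg (by simpa using hs)]
      exact ih hz

theorem pvSummary_one (l : List String) (kw : String)
    (h : l.filter (fun s => pvKeywords.contains s) = [kw]) :
    ∃ i, PySem.List.index? l kw = some i ∧ pvSummary l = PvFound.one kw l[i + 1]? := by
  induction l with
  | nil => simp at h
  | cons s rest ih =>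
    simp only [List.filter_cons] at h
    by_cases hs : s ∈ pvKeywords
    · rw [if_pos (by simpa using hs)] at h
      obtain ⟨hsk, hrest⟩ := List.cons_eq_cons.mp h
      subst hsk
      refine ⟨0, ?_, ?_⟩
      · rw [PySem.List.index?_cons_self]
      · simp only [pvSummary]
        rw [if_pos (by simpa using hs), pvSummary_zero rest hrest]
        simp [List.head?_eq_getElem?]
    · rw [if_neg (by simpa using hs)] at h
      obtain ⟨i, hi, hsum⟩ := ih h
      have hkw : kw ∈ rest.filter (fun s => pvKeywords.contains s) := by rw [h]; simp
      have hkwk : kw ∈ pvKeywords := by simpa using (List.of_mem_filter hkw)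
      have hne : s ≠ kw := fun he => hs (he ▸ hkwk)
      refine ⟨i + 1, ?_, ?_⟩
      · rw [PySem.List.index?_cons_of_ne rest hne, hi]; rfl
      · simp only [pvSummary]
        rw [if_neg (by simpa using hs), hsum, List.getElem?_cons_succ]

theorem pvSummary_many (l : List String) (a b : String) (tl : List String)
    (h : l.filter (fun s => pvKeywords.contains s) = a :: b :: tl) :
    pvSummary l = PvFound.many := by
  induction l generalizing a b tl with
  | nil => simp at h
  | cons s rest ih =>
    simp only [List.filter_cons] at h
    by_cases hs : s ∈ pvKeywords
    · rw [if_pos (by simpa using hs)] at h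
      obtain ⟨hsa, hrest⟩ := List.cons_eq_cons.mp h
      have hnz : pvSummary rest ≠ PvFound.zero := by
        intro hz
        rw [pvSummary_zero' rest hz] at hrest
        simp at hrest
      simp only [pvSummary]
      rw [if_pos (by simpa using hs)]
    · rw [if_neg (by simpa using hs)] at h
      simp only [pvSummary]
      rw [if_neg (by simpa using hs)]
      exact ih _ _ _ h

theorem pv_main (l : List String) : get_price_ranking l = get_price_ranking_alt l := by
  unfold get_price_ranking get_price_ranking_alt
  rw [pvALoop_zero, pvBFold_eq]
  cases hf : l.filter (fun s => pvKeywords.contains s) with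
  | nil => rw [pvSummary_zero l hf]
  | cons a tl =>
    cases tl with
    | nil =>
      obtain ⟨i, hi, hsum⟩ := pvSummary_one l a hf
      rw [hsum]
      simp only [hi]
      by_cases hlt : i + 1 < l.length
      · rw [if_pos hlt, List.getElem?_eq_getElem hlt]
        cases hd : PySem.Str.strIsdigit l[i + 1] <;>
          cases ho : PySem.Int.ofStr? l[i + 1] <;>
            simp [ho] <;> split_ifs <;> simp
      · rw [if_neg hlt]
        rw [List.getElem?_eq_none (by omega)]
    | cons b tl' => rw [pvSummary_many l a b tl' hf]

-- ===== VERDICT (by name: the statement is the Claim_ definition above) =====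
theorem get_price_ranking_spec : Claim_equal_get_price_ranking := by
  intro l _
  unfold Spec_get_price_ranking
  exact pv_main l
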